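-- pv_equiv track=rewrite | github.com/ashermorgan/Songs2Slides | songs2slides/core.py | parse_song_lyrics
-- ===== SOURCE A (Python) =====
-- def parse_song_lyrics(lyrics: str, lines_per_slide: int):
--     """
--     Parse slide contents from the raw lyrics of a song
--
--     Used by assemble_slides
--
--     Parameters
--     ----------
--     lyrics : str
--         The song lyrics
--     lines_per_slide : int
--         The maximum number of lines per slide
--
--     Returns
--     -------
--     list of str
--         The list of slide contents
--     """
--
--     slides = ['']
--     line_count = 0
--
--     for line in lyrics.strip().split('\n'):
--         line = line.strip()
--
--         if line == '':
--             # Empty line represents new slide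
--             if line_count != 0 or len(slides) < 2 or slides[-2] != '':
--                 # Consecutive empty slides are not allowed
--                 slides += ['']
--                 line_count = 0
--
--         elif lines_per_slide is None or line_count < lines_per_slide:
--             # Add line to current slide
--             if line_count != 0: slides[-1] += '\n'
--             slides[-1] += line
--             line_count += 1
--
--         else:
--             # Overflow to new slide
--             slides += [line]
--             line_count = 1
--
--     # Address case where lyrics are empty
--     if slides == ['', '']: slides = []
--
--     return slides
-- ===== SOURCE B (Python) =====
-- def parse_song_lyrics(lyrics: str, lines_per_slide: int):
--     """Split lyrics into slides: stanzas (runs of non-empty lines) are chunked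
--     into lines_per_slide-line slides; a blank run of >= 2 lines yields one
--     empty slide between stanzas."""
--     text = lyrics.strip()
--     if text == '':
--         return []
--     lines = [l.strip() for l in text.split('\n')]
--     return _emit(lines, lines_per_slide)
--
--
-- def _emit(lines, lines_per_slide):
--     """Emit the slides for a list of stripped lines (recursing run by run)."""
--     if not lines:
--         return []
--     if lines[0] == '':
--         i = 0
--         while i < len(lines) and lines[i] == '':
--             i += 1
--         head = [''] if i >= 2 else []
--         return head + _emit(lines[i:], lines_per_slide)
--     else:
--         i = 0
--         while i < len(lines) and lines[i] != '':
--             i += 1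
--         return _chunks(lines[:i], lines_per_slide) + _emit(lines[i:], lines_per_slide)
--
--
-- def _chunks(stanza, lines_per_slide):
--     """Join a stanza into slides of at most lines_per_slide lines each."""
--     if lines_per_slide is None:
--         return ['\n'.join(stanza)]
--     return ['\n'.join(stanza[k:k + lines_per_slide])
--             for k in range(0, len(stanza), lines_per_slide)]
-- ===== Notes on version B (the rewrite author's own statement) =====
-- stated objective: alternative
-- what changed: B decomposes the stripped lines into maximal stanza/blank runs in one scan and builds each slide with a single '\n'.join over a chunk (emitting one empty slide per blank run of length >= 2), instead of A's stateful line-by-line loop that mutates the last slide string and tracks a line counter.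
-- outside the precondition, e.g. on parse_song_lyrics('a', 0): A returns ['', 'a'], B raises ValueError; on parse_song_lyrics('a', -1): A returns ['', 'a'], B returns []
import Mathlib
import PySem

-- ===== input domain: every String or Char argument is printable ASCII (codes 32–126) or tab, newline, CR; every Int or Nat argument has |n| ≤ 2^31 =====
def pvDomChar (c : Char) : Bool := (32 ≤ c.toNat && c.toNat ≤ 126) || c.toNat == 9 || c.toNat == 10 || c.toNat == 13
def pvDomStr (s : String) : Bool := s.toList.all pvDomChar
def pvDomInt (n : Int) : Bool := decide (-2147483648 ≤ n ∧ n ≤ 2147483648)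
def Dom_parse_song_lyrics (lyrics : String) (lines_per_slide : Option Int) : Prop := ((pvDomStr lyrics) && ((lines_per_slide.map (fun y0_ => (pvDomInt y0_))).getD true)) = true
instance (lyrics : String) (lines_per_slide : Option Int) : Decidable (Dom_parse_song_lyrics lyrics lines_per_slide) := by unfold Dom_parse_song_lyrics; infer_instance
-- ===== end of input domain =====

-- B replaces A's stateful line loop (which mutates the last slide string and tracks a
-- line counter) by a run decomposition: stanzas are chunked and '\n'-joined, blank runs
-- of length ≥ 2 yield one empty slide.  Objective: alternative decomposition.

-- ===== PORT A =====
-- 'lines_per_slide is None or line_count < lines_per_slide'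
def pvFits (n? : Option Int) (lc : Int) : Bool :=
  match n? with
  | none => true
  | some n => decide (lc < n)

-- 'slides[-1] += s'
def pvAppendLast (xs : List (List Char)) (s : List Char) : List (List Char) :=
  match xs with
  | [] => []
  | [x] => [x ++ s]
  | x :: y :: t => x :: pvAppendLast (y :: t) s

-- one iteration of A's for-loop; state = (slides, line_count)
def pvStepA (n? : Option Int) (st : List (List Char) × Int) (rawline : List Char) : List (List Char) × Int :=
  let slides := st.1
  let lc := st.2
  let line := PySem.Chars.strip rawline
  if line = [] then
    if lc ≠ 0 ∨ slides.length < 2 ∨ PySem.List.pyGet? slides (-2) ≠ some [] then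
      (slides ++ [[]], 0)
    else (slides, lc)
  else if pvFits n? lc then
    let slides := if lc ≠ 0 then pvAppendLast slides ['\n'] else slides
    (pvAppendLast slides line, lc + 1)
  else
    (slides ++ [line], 1)

def parse_song_lyrics (lyrics : String) (lines_per_slide : Option Int) : List String :=
  let st := (PySem.Chars.splitOn (PySem.Chars.strip lyrics.toList) ['\n']).foldl
      (pvStepA lines_per_slide) ([[]], 0)
  let slides := if st.1 = [[], []] then [] else st.1
  slides.map String.ofList

-- ===== PORT B =====
-- 'while i < len(lines) and lines[i] == "": i += 1'  (counting from the front)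
def pvCountBlank : List (List Char) → Nat
  | [] => 0
  | l :: ls => if l = [] then pvCountBlank ls + 1 else 0

-- 'while i < len(lines) and lines[i] != "": i += 1'
def pvCountStanza : List (List Char) → Nat
  | [] => 0
  | l :: ls => if l = [] then 0 else pvCountStanza ls + 1

-- termination facts for pvEmit (cited by its decreasing_by)
theorem pvCountBlank_pos (ls : List (List Char)) : 1 ≤ pvCountBlank ([] :: ls) := by
  simp [pvCountBlank]

theorem pvCountStanza_pos (l : List Char) (ls : List (List Char)) (h : ¬ l = []) :
    1 ≤ pvCountStanza (l :: ls) := by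
  simp [pvCountStanza, h]

-- _chunks: one slide per range(0, len(stanza), lines_per_slide) slice
def pvChunks (n? : Option Int) (stanza : List (List Char)) : List (List Char) :=
  match n? with
  | none => [PySem.Chars.join ['\n'] stanza]
  | some n => (PySem.List.pyRange 0 stanza.length n).map
      (fun k => PySem.Chars.join ['\n'] (PySem.List.slice stanza (some k) (some (k + n))))

-- _emit: consume one blank run or one stanza, recurse on the remainder
def pvEmit (n? : Option Int) (lines : List (List Char)) : List (List Char) :=
  match lines with
  | [] => []
  | l :: ls =>
    if h : l = [] then
      let i := pvCountBlank (l :: ls)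
      (if 2 ≤ i then [[]] else []) ++ pvEmit n? ((l :: ls).drop i)
    else
      let i := pvCountStanza (l :: ls)
      pvChunks n? ((l :: ls).take i) ++ pvEmit n? ((l :: ls).drop i)
termination_by lines.length
decreasing_by
  · subst h
    have := pvCountBlank_pos ls
    simp only [List.length_drop, List.length_cons]
    omega
  · have := pvCountStanza_pos l ls h
    simp only [List.length_drop, List.length_cons]
    omega

def parse_song_lyrics_alt (lyrics : String) (lines_per_slide : Option Int) : List String :=
  let text := PySem.Chars.strip lyrics.toList
  if text = [] then []
  else
    (pvEmit lines_per_slide ((PySem.Chars.splitOn text ['\n']).map PySem.Chars.strip)).map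
      String.ofList

-- ===== PRECONDITION & SPEC =====
-- Pre_ excludes lines_per_slide = some n with n ≤ 0, a slide capacity no caller would
-- specify: A there returns an accidental leading empty slide while B's natural chunking
-- raises ValueError (range step 0) or yields no chunks (negative step).
def Pre_parse_song_lyrics (lyrics : String) (lines_per_slide : Option Int) : Prop :=
  1 ≤ lines_per_slide.getD 1

instance (lyrics : String) (lines_per_slide : Option Int) :
    Decidable (Pre_parse_song_lyrics lyrics lines_per_slide) := by
  unfold Pre_parse_song_lyrics; infer_instance

def pvWitness_parse_song_lyrics : String × Option Int := ("Hello\nworld", some 1)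

def Spec_parse_song_lyrics (lyrics : String) (lines_per_slide : Option Int) (out : List String) : Prop :=
  out = parse_song_lyrics_alt lyrics lines_per_slide

instance (lyrics : String) (lines_per_slide : Option Int) (out : List String) :
    Decidable (Spec_parse_song_lyrics lyrics lines_per_slide out) := by
  unfold Spec_parse_song_lyrics; infer_instance

-- ===== CLAIM (what is proved, stated in full; the proofs are below) =====
def Claim_equal_parse_song_lyrics : Prop := ∀ (lyrics : String) (lines_per_slide : Option Int), Dom_parse_song_lyrics lyrics lines_per_slide → Pre_parse_song_lyrics lyrics lines_per_slide → Spec_parse_song_lyrics lyrics lines_per_slide (parse_song_lyrics lyrics lines_per_slide)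

-- ===== LEMMAS AND PROOFS =====

-- A's loop body on an already-stripped line
def pvCore (n? : Option Int) (st : List (List Char) × Int) (line : List Char) : List (List Char) × Int :=
  let slides := st.1
  let lc := st.2
  if line = [] then
    if lc ≠ 0 ∨ slides.length < 2 ∨ PySem.List.pyGet? slides (-2) ≠ some [] then
      (slides ++ [[]], 0)
    else (slides, lc)
  else if pvFits n? lc then
    let slides := if lc ≠ 0 then pvAppendLast slides ['\n'] else slides
    (pvAppendLast slides line, lc + 1)
  else
    (slides ++ [line], 1)

-- s.split('\n') as a plain structural recursion (first argument: accumulated piece)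
def pvSplitNL : List Char → List Char → List (List Char)
  | pre, [] => [pre]
  | pre, c :: r => if c = '\n' then pre :: pvSplitNL [] r else pvSplitNL (pre ++ [c]) r

theorem pvSplitOn_go (l : List Char) : ∀ (fuel : Nat) (cur : List Char) (acc : List (List Char)),
    l.length < fuel →
    PySem.Chars.splitOn.go ['\n'] fuel l cur acc = acc.reverse ++ pvSplitNL cur.reverse l := by
  induction l with
  | nil =>
    intro fuel cur acc hf
    cases fuel with
    | zero => omega
    | succ f => rw [PySem.Chars.splitOn.go] <;> simp [pvSplitNL]
  | cons c r ih =>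
    intro fuel cur acc hf
    cases fuel with
    | zero => omega
    | succ f =>
      simp only [List.length_cons] at hf
      by_cases hc : c = '\n'
      · subst hc
        rw [PySem.Chars.splitOn.go]
        have hpre : (['\n'] : List Char).isPrefixOf ('\n' :: r) = true := by
          simp [List.isPrefixOf]
        simp only [hpre, if_pos, List.length_cons, List.length_nil, List.drop_succ_cons, List.drop_zero]
        rw [ih f [] (cur.reverse :: acc) (by omega)]
        simp [pvSplitNL]
      · rw [PySem.Chars.splitOn.go]
        have hpre : (['\n'] : List Char).isPrefixOf (c :: r) = false := by
          simp [List.isPrefixOf]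
          exact fun hh => absurd hh.symm hc
        simp only [hpre, Bool.false_eq_true, if_neg, not_false_eq_true]
        rw [ih f (c :: cur) acc (by omega)]
        simp [pvSplitNL, hc]

theorem pvSplitOn_eq (s : List Char) :
    PySem.Chars.splitOn s ['\n'] = pvSplitNL [] s := by
  have := pvSplitOn_go s (s.length + 1) [] [] (by omega)
  simpa [PySem.Chars.splitOn] using this

theorem pvSplitNL_ne_nil (pre l : List Char) : pvSplitNL pre l ≠ [] := by
  induction l generalizing pre with
  | nil => simp [pvSplitNL]
  | cons c r ih => by_cases h : c = '\n' <;> simp [pvSplitNL, h, ih]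

theorem pvSplitNL_head (pre l : List Char) :
    (pvSplitNL pre l).head? = some (pre ++ l.takeWhile (· ≠ '\n')) := by
  induction l generalizing pre with
  | nil => simp [pvSplitNL]
  | cons c r ih =>
    by_cases h : c = '\n'
    · simp [pvSplitNL, h, List.takeWhile_cons]
    · simp [pvSplitNL, h, List.takeWhile_cons, ih]

theorem pvSplitNL_getLast (pre l : List Char) (hl : l ≠ [])
    (hc : l.getLast hl ≠ '\n') :
    ∃ g, (pvSplitNL pre l).getLast? = some g ∧ l.getLast hl ∈ g := by
  induction l generalizing pre with
  | nil => exact absurd rfl hl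
  | cons c r ih =>
    cases r with
    | nil =>
      simp only [List.getLast_singleton] at hc ⊢
      simp [pvSplitNL, hc]
    | cons d t =>
      have hr : (d :: t : List Char) ≠ [] := by simp
      have hlast : (c :: d :: t).getLast hl = (d :: t).getLast hr := by
        simp [List.getLast_cons]
      rw [hlast] at hc ⊢
      by_cases h : c = '\n'
      · subst h
        obtain ⟨g, hg, hmem⟩ := ih [] hr hc
        refine ⟨g, ?_, hmem⟩
        have hne := pvSplitNL_ne_nil [] (d :: t)
        have hunf : pvSplitNL pre ('\n' :: d :: t) = pre :: pvSplitNL [] (d :: t) := by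
          simp [pvSplitNL]
        rw [hunf]
        cases hx : pvSplitNL [] (d :: t) with
        | nil => exact absurd hx hne
        | cons p ps =>
          rw [hx] at hg
          rw [List.getLast?_cons_cons]
          exact hg
      · obtain ⟨g, hg, hmem⟩ := ih (pre ++ [c]) hr hc
        exact ⟨g, by simpa [pvSplitNL, h] using hg, hmem⟩

-- ===== strip facts =====
theorem pvStrip_ne_nil (cs : List Char) (c : Char) (hm : c ∈ cs)
    (hc : PySem.Chars.isspace c = false) : PySem.Chars.strip cs ≠ [] := by
  intro hs
  unfold PySem.Chars.strip PySem.Chars.rstrip PySem.Chars.lstrip at hs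
  rw [List.reverse_eq_nil_iff, List.dropWhile_eq_nil_iff] at hs
  have hall : ∀ x ∈ List.dropWhile PySem.Chars.isspace cs, PySem.Chars.isspace x = true := by
    intro x hx
    exact hs x (by simpa using hx)
  have := List.takeWhile_append_dropWhile (p := PySem.Chars.isspace) (l := cs)
  rw [← this] at hm
  rcases List.mem_append.mp hm with h | h
  · rw [List.mem_takeWhile_imp h] at hc; exact absurd hc (by simp)
  · rw [hall c h] at hc; exact absurd hc (by simp)

theorem pvStrip_head (s : List Char) (h : PySem.Chars.strip s ≠ []) :
    PySem.Chars.isspace ((PySem.Chars.strip s).head h) = false := by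
  unfold PySem.Chars.strip PySem.Chars.rstrip PySem.Chars.lstrip at h ⊢
  have hsuf : List.dropWhile PySem.Chars.isspace
        (List.dropWhile PySem.Chars.isspace s).reverse <:+
      (List.dropWhile PySem.Chars.isspace s).reverse := List.dropWhile_suffix _
  have hpre : (List.dropWhile PySem.Chars.isspace
        (List.dropWhile PySem.Chars.isspace s).reverse).reverse <+:
      List.dropWhile PySem.Chars.isspace s := by
    simpa using hsuf.reverse
  rw [List.IsPrefix.head hpre h]
  exact List.head_dropWhile_not _ _

theorem pvStrip_getLast (s : List Char) (h : PySem.Chars.strip s ≠ []) :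
    PySem.Chars.isspace ((PySem.Chars.strip s).getLast h) = false := by
  unfold PySem.Chars.strip PySem.Chars.rstrip at h ⊢
  simp only [List.getLast_eq_head_reverse, List.reverse_reverse]
  exact List.head_dropWhile_not _ _

-- ===== the state machine that A's fold implements =====
inductive PvSt where
  | inSt : List Char → Int → PvSt
  | b1 : List Char → PvSt
  | b2 : List Char → PvSt

def pvR (n? : Option Int) : List (List Char) → PvSt → List (List Char)
  | [], .inSt cur _ => [cur]
  | [], .b1 last => [last, []]
  | [], .b2 last => [last, [], []]
  | l :: ls, .inSt cur c =>
      if l = [] then pvR n? ls (.b1 cur)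
      else if pvFits n? c then pvR n? ls (.inSt (cur ++ '\n' :: l) (c + 1))
      else cur :: pvR n? ls (.inSt l 1)
  | l :: ls, .b1 last =>
      if l = [] then pvR n? ls (.b2 last)
      else last :: pvR n? ls (.inSt l 1)
  | l :: ls, .b2 last =>
      if l = [] then pvR n? ls (.b2 last)
      else last :: [] :: pvR n? ls (.inSt l 1)

def pvRepr : PvSt → List (List Char)
  | .inSt cur _ => [cur]
  | .b1 last => [last, []]
  | .b2 last => [last, [], []]

def pvCOf : PvSt → Int
  | .inSt _ c => c
  | _ => 0

def pvOk : PvSt → Prop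
  | .inSt cur c => cur ≠ [] ∧ 1 ≤ c
  | .b1 last => last ≠ []
  | .b2 last => last ≠ []

theorem pvAppendLast_append (S : List (List Char)) (cur s : List Char) :
    pvAppendLast (S ++ [cur]) s = S ++ [cur ++ s] := by
  induction S with
  | nil => simp [pvAppendLast]
  | cons a S' ih =>
    cases S' with
    | nil => simp [pvAppendLast]
    | cons b S'' => simpa [pvAppendLast] using ih

theorem pvGet_neg_two (S : List (List Char)) (a b : List Char) :
    PySem.List.pyGet? (S ++ [a, b]) (-2) = some a := by
  have hlen : (S ++ [a, b]).length = S.length + 2 := by simp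
  simp only [PySem.List.pyGet?, PySem.List.pyIdx?, hlen]
  have h1 : ¬ (0 : Int) ≤ -2 := by omega
  have h2 : -((S.length + 2 : Nat) : Int) ≤ -2 := by push_cast; omega
  simp only [h1, if_false, h2, if_true, if_pos, if_neg, not_false_eq_true]
  have h3 : S.length + 2 - ((-(-2 : Int)).toNat) = S.length := by simp
  rw [h3]
  simp [List.getElem?_append_right (le_refl S.length)]

theorem pvFits_zero (n? : Option Int) (hp : 1 ≤ n?.getD 1) : pvFits n? 0 = true := by
  cases n? with
  | none => rfl
  | some n => simp [pvFits] at *; omega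

-- A's fold, from any reachable state, computes pvR
theorem pvAR (n? : Option Int) (hp : 1 ≤ n?.getD 1) :
    ∀ (ls S : List (List Char)) (st : PvSt), pvOk st →
    (ls.foldl (pvCore n?) (S ++ pvRepr st, pvCOf st)).1 = S ++ pvR n? ls st := by
  intro ls
  induction ls with
  | nil =>
    intro S st hok
    cases st <;> simp [pvRepr, pvR]
  | cons l ls ih =>
    intro S st hok
    rw [List.foldl_cons]
    cases st with
    | inSt cur c =>
      obtain ⟨hcur, hc⟩ := hok
      simp only [pvRepr, pvCOf]
      by_cases hl : l = []
      · subst hl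
        have hstep : pvCore n? (S ++ [cur], c) [] = (S ++ [cur, []], 0) := by
          simp only [pvCore]
          rw [if_pos trivial, if_pos (Or.inl (by omega))]
          simp
        rw [hstep]
        have := ih S (.b1 cur) hcur
        simp only [pvRepr, pvCOf] at this
        rw [this]
        simp [pvR]
      · by_cases hf : pvFits n? c = true
        · have hstep : pvCore n? (S ++ [cur], c) l = (S ++ [cur ++ '\n' :: l], c + 1) := by
            simp only [pvCore]
            rw [if_neg hl, if_pos hf, if_pos (by omega : c ≠ 0)]
            rw [pvAppendLast_append, pvAppendLast_append]
            simp
          rw [hstep]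
          have := ih S (.inSt (cur ++ '\n' :: l) (c + 1)) ⟨by simp, by omega⟩
          simp only [pvRepr, pvCOf] at this
          rw [this]
          simp [pvR, hl, hf]
        · have hstep : pvCore n? (S ++ [cur], c) l = ((S ++ [cur]) ++ [l], 1) := by
            simp only [pvCore]
            rw [if_neg hl, if_neg hf]
          rw [hstep]
          have := ih (S ++ [cur]) (.inSt l 1) ⟨hl, le_refl 1⟩
          simp only [pvRepr, pvCOf] at this
          rw [this]
          simp [pvR, hl, hf]
    | b1 last =>
      have hlast : last ≠ [] := hok
      simp only [pvRepr, pvCOf]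
      by_cases hl : l = []
      · subst hl
        have hstep : pvCore n? (S ++ [last, []], 0) [] = (S ++ [last, [], []], 0) := by
          simp only [pvCore]
          rw [if_pos trivial, if_pos (Or.inr (Or.inr (by
            rw [pvGet_neg_two S last []]
            simp [hlast])))]
          simp
        rw [hstep]
        have := ih S (.b2 last) hlast
        simp only [pvRepr, pvCOf] at this
        rw [this]
        simp [pvR]
      · have hstep : pvCore n? (S ++ [last, []], 0) l = ((S ++ [last]) ++ [l], 1) := by
          simp only [pvCore]
          rw [if_neg hl, if_pos (pvFits_zero n? hp), if_neg (by omega : ¬ (0:Int) ≠ 0)]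
          have hsplit : S ++ [last, []] = (S ++ [last]) ++ [[]] := by simp
          rw [hsplit, pvAppendLast_append]
          simp
        rw [hstep]
        have := ih (S ++ [last]) (.inSt l 1) ⟨hl, le_refl 1⟩
        simp only [pvRepr, pvCOf] at this
        rw [this]
        simp [pvR, hl]
    | b2 last =>
      have hlast : last ≠ [] := hok
      simp only [pvRepr, pvCOf]
      by_cases hl : l = []
      · subst hl
        have hstep : pvCore n? (S ++ [last, [], []], 0) [] = (S ++ [last, [], []], 0) := by
          simp only [pvCore]
          rw [if_pos trivial, if_neg]
          push_neg
          refine ⟨by omega, by simp, ?_⟩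
          have hsplit : S ++ [last, [], []] = (S ++ [last]) ++ [[], []] := by simp
          rw [hsplit, pvGet_neg_two (S ++ [last]) [] []]
        rw [hstep]
        have := ih S (.b2 last) hlast
        simp only [pvRepr, pvCOf] at this
        rw [this]
        simp [pvR]
      · have hstep : pvCore n? (S ++ [last, [], []], 0) l = ((S ++ [last, []]) ++ [l], 1) := by
          simp only [pvCore]
          rw [if_neg hl, if_pos (pvFits_zero n? hp), if_neg (by omega : ¬ (0:Int) ≠ 0)]
          have hsplit : S ++ [last, [], []] = (S ++ [last, []]) ++ [[]] := by simp
          rw [hsplit, pvAppendLast_append]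
          simp
        rw [hstep]
        have := ih (S ++ [last, []]) (.inSt l 1) ⟨hl, le_refl 1⟩
        simp only [pvRepr, pvCOf] at this
        rw [this]
        simp [pvR, hl]

-- ===== B's run decomposition =====
def pvJoinCont (w : List (List Char)) : List Char := (w.map (fun x => '\n' :: x)).flatten

-- continuing a stanza whose current slide 'cur' already holds c lines
def pvCont (n? : Option Int) (cur : List Char) (c : Int) (w : List (List Char)) : List (List Char) :=
  match n? with
  | none => [cur ++ pvJoinCont w]
  | some n => (cur ++ pvJoinCont (w.take (n - c).toNat)) :: pvChunks (some n) (w.drop (n - c).toNat)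

theorem pvJoin_cons (x : List Char) (xs : List (List Char)) :
    PySem.Chars.join ['\n'] (x :: xs) = x ++ pvJoinCont xs := by
  induction xs generalizing x with
  | nil => simp [PySem.Chars.join, List.intercalate, List.intersperse, pvJoinCont]
  | cons y t ih =>
    have step : PySem.Chars.join ['\n'] (x :: y :: t) =
        x ++ ['\n'] ++ PySem.Chars.join ['\n'] (y :: t) := by
      simp [PySem.Chars.join, List.intercalate, List.intersperse]
    rw [step, ih y]
    simp [pvJoinCont]

theorem pvChunks_cons (n : Int) (hn : 1 ≤ n) (st : List (List Char)) (h : st ≠ []) :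
    pvChunks (some n) st =
      PySem.Chars.join ['\n'] (st.take n.toNat) :: pvChunks (some n) (st.drop n.toNat) := by
  have hn0 : n ≠ 0 := by omega
  have hL : 0 < st.length := List.length_pos_iff.mpr h
  have hL1 : (1 : Int) ≤ (st.length : Int) := by exact_mod_cast hL
  have key : ((st.length : Int) + n - 1) / n = ((st.length : Int) - 1) / n + 1 := by
    have e : (st.length : Int) + n - 1 = ((st.length : Int) - 1) + 1 * n := by ring
    rw [e, Int.add_mul_ediv_right _ _ hn0]
  set m : Nat := (((st.length : Int) - 1) / n).toNat with hm
  have hdivnn : 0 ≤ ((st.length : Int) - 1) / n := Int.ediv_nonneg (by omega) (by omega)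
  have hmn : (((st.length : Int) + n - 1) / n).toNat = m + 1 := by
    rw [key, hm]; omega
  have hrange : PySem.List.pyRange 0 (st.length : Int) n =
      List.map (fun k : Nat => n * (k : Int)) (List.range (m + 1)) := by
    rw [PySem.List.pyRange_of_pos 0 (st.length : Int) (by omega)]
    simp only [sub_zero]
    rw [if_pos (by omega), hmn]
    simp [mul_comm]
  have hcount : PySem.List.pyRange 0 ((st.drop n.toNat).length : Int) n =
      List.map (fun k : Nat => n * (k : Int)) (List.range m) := by
    by_cases hle : n ≤ (st.length : Int)
    · have hnle : n.toNat ≤ st.length := by omega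
      have hlen : ((st.drop n.toNat).length : Int) = (st.length : Int) - n := by
        simp only [List.length_drop]
        push_cast [Nat.cast_sub hnle]
        omega
      rw [hlen, PySem.List.pyRange_of_pos 0 _ (by omega : (0:Int) < n)]
      simp only [sub_zero]
      by_cases hlt : (0:Int) < (st.length : Int) - n
      · rw [if_pos hlt]
        have e : (st.length : Int) - n + n - 1 = (st.length : Int) - 1 := by ring
        rw [e, ← hm]
        simp [mul_comm]
      · rw [if_neg hlt]
        have hm0 : m = 0 := by
          have : ((st.length : Int) - 1) / n = 0 :=
            Int.ediv_eq_zero_of_lt (by omega) (by omega)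
          omega
        simp [hm0]
    · have hdrop : st.drop n.toNat = [] := by
        rw [List.drop_eq_nil_iff]
        omega
      have hm0 : m = 0 := by
        have : ((st.length : Int) - 1) / n = 0 :=
          Int.ediv_eq_zero_of_lt (by omega) (by omega)
        omega
      rw [hdrop, hm0]
      simp [PySem.List.pyRange_of_pos 0 0 (by omega : (0:Int) < n)]
  have hpt : ∀ k : Nat,
      PySem.List.slice st (some (n * ((k : Int) + 1))) (some (n * ((k : Int) + 1) + n)) =
        PySem.List.slice (st.drop n.toNat) (some (n * (k : Int))) (some (n * (k : Int) + n)) := by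
    intro k
    have ha : 0 ≤ n * (k : Int) := mul_nonneg (by omega) (by positivity)
    have e1 : n * ((k : Int) + 1) = n * (k : Int) + n := by ring
    rw [e1]
    rw [PySem.List.slice_toNat st (by omega) (by omega)]
    rw [PySem.List.slice_toNat (st.drop n.toNat) (by omega) (by omega)]
    rw [List.drop_drop]
    congr 1
    · omega
    · congr 1
      omega
  simp only [pvChunks, hrange, hcount]
  rw [List.range_succ_eq_map]
  simp only [List.map_cons, List.map_map]
  congr 1
  · have e0 : n * ((0:Nat) : Int) = 0 := by simp
    rw [e0]
    simp only [zero_add]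
    rw [PySem.List.slice_toNat st (by omega) (by omega)]
    simp
  · apply List.map_congr_left
    intro k _
    simp only [Function.comp]
    have ec : ((Nat.succ k : Nat) : Int) = (k : Int) + 1 := by push_cast; ring
    rw [ec, hpt k]

theorem pvChunks_nil (n : Int) (hn : 1 ≤ n) : pvChunks (some n) [] = [] := by
  simp [pvChunks, PySem.List.pyRange_of_pos 0 0 (by omega : (0:Int) < n)]

theorem pvCont_nil (n? : Option Int) (hp : 1 ≤ n?.getD 1) (cur : List Char) (c : Int) :
    pvCont n? cur c [] = [cur] := by
  cases n? with
  | none => simp [pvCont, pvJoinCont]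
  | some n =>
    simp only [Option.getD] at hp
    simp [pvCont, pvJoinCont, pvChunks_nil n hp]

theorem pvCont_fits (n? : Option Int) (cur : List Char) (c : Int) (l : List Char)
    (w : List (List Char)) (hf : pvFits n? c = true) :
    pvCont n? cur c (l :: w) = pvCont n? (cur ++ '\n' :: l) (c + 1) w := by
  cases n? with
  | none => simp [pvCont, pvJoinCont]
  | some n =>
    simp only [pvFits, decide_eq_true_eq] at hf
    have h1 : (n - c).toNat = (n - (c + 1)).toNat + 1 := by omega
    simp only [pvCont, h1, List.take_succ_cons, List.drop_succ_cons]
    simp [pvJoinCont]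

theorem pvCont_over (n : Int) (hn : 1 ≤ n) (cur : List Char) (c : Int) (l : List Char)
    (w : List (List Char)) (hf : ¬ c < n) (hcap : c ≤ n) :
    pvCont (some n) cur c (l :: w) = cur :: pvCont (some n) l 1 w := by
  have hc : c = n := by omega
  subst hc
  have h0 : (c - c).toNat = 0 := by omega
  have h1 : c.toNat = (c - 1).toNat + 1 := by omega
  simp only [pvCont, h0, List.take_zero, List.drop_zero]
  rw [pvChunks_cons c hn (l :: w) (by simp), h1]
  simp only [List.take_succ_cons, List.drop_succ_cons, pvJoin_cons]
  simp [pvJoinCont]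

theorem pvCH (n? : Option Int) (hp : 1 ≤ n?.getD 1) (s₀ : List Char) (w : List (List Char)) :
    pvChunks n? (s₀ :: w) = pvCont n? s₀ 1 w := by
  cases n? with
  | none => simp [pvChunks, pvCont, pvJoin_cons]
  | some n =>
    simp only [Option.getD] at hp
    have h1 : n.toNat = (n - 1).toNat + 1 := by omega
    rw [pvChunks_cons n hp (s₀ :: w) (by simp), h1]
    simp only [List.take_succ_cons, List.drop_succ_cons, pvJoin_cons]
    rfl

-- ===== pvEmit unfoldings =====
theorem pvEmit_nil (n? : Option Int) : pvEmit n? [] = [] := by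
  rw [pvEmit]

theorem pvEmit_blank (n? : Option Int) (ls : List (List Char)) :
    pvEmit n? ([] :: ls) =
      (if 1 ≤ pvCountBlank ls then [[]] else []) ++ pvEmit n? (ls.drop (pvCountBlank ls)) := by
  rw [pvEmit]
  have hcb : pvCountBlank ([] :: ls) = pvCountBlank ls + 1 := by simp [pvCountBlank]
  rw [dif_pos (rfl : ([] : List Char) = [])]
  simp only [hcb, List.drop_succ_cons]
  congr 1
  by_cases hb : 1 ≤ pvCountBlank ls
  · rw [if_pos hb, if_pos (by omega)]
  · rw [if_neg hb, if_neg (by omega)]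

theorem pvEmit_stanza (n? : Option Int) (l : List Char) (ls : List (List Char)) (h : l ≠ []) :
    pvEmit n? (l :: ls) =
      pvChunks n? (l :: ls.take (pvCountStanza ls)) ++ pvEmit n? (ls.drop (pvCountStanza ls)) := by
  rw [pvEmit]
  have hcs : pvCountStanza (l :: ls) = pvCountStanza ls + 1 := by simp [pvCountStanza, h]
  simp only [dif_neg h, hcs, List.drop_succ_cons, List.take_succ_cons]

-- last line non-blank
def pvLastNB (ls : List (List Char)) : Prop := ∀ x, ls.getLast? = some x → x ≠ []

theorem pvLastNB_tail (l : List Char) (ls : List (List Char)) (h : pvLastNB (l :: ls)) :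
    pvLastNB ls := by
  cases ls with
  | nil => intro x hx; simp at hx
  | cons y t => intro x hx; exact h x (by rwa [List.getLast?_cons_cons])

-- the state machine computes B's run decomposition
theorem pvRB (n? : Option Int) (hp : 1 ≤ n?.getD 1) :
    ∀ ls : List (List Char),
      (∀ cur c, 1 ≤ c → (∀ n, n? = some n → c ≤ n) → pvLastNB ls →
         pvR n? ls (.inSt cur c) =
           pvCont n? cur c (ls.take (pvCountStanza ls)) ++ pvEmit n? (ls.drop (pvCountStanza ls)))
      ∧ (∀ last, ls ≠ [] → pvLastNB ls →
         pvR n? ls (.b1 last) =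
           last :: ((if 1 ≤ pvCountBlank ls then [[]] else []) ++ pvEmit n? (ls.drop (pvCountBlank ls))))
      ∧ (∀ last, ls ≠ [] → pvLastNB ls →
         pvR n? ls (.b2 last) = last :: [] :: pvEmit n? (ls.drop (pvCountBlank ls))) := by
  have hcap1 : ∀ n : Int, n? = some n → (1 : Int) ≤ n := by
    intro n hn
    rw [hn] at hp
    simpa using hp
  intro ls
  induction ls with
  | nil =>
    refine ⟨?_, ?_, ?_⟩
    · intro cur c _ _ _
      simp [pvR, pvCountStanza, pvEmit_nil, pvCont_nil n? hp]
    · intro last h _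
      exact absurd rfl h
    · intro last h _
      exact absurd rfl h
  | cons l ls ih =>
    obtain ⟨ih1, ih2, ih3⟩ := ih
    refine ⟨?_, ?_, ?_⟩
    · -- mid-stanza state
      intro cur c hc hcap hnb
      by_cases hl : l = []
      · subst hl
        have hlsne : ls ≠ [] := by
          intro h0
          subst h0
          exact (hnb [] rfl) rfl
        rw [show pvR n? ([] :: ls) (.inSt cur c) = pvR n? ls (.b1 cur) from by simp [pvR]]
        rw [ih2 cur hlsne (pvLastNB_tail _ _ hnb)]
        rw [show pvCountStanza ([] :: ls) = 0 from by simp [pvCountStanza]]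
        simp only [List.take_zero, List.drop_zero]
        rw [pvCont_nil n? hp, pvEmit_blank]
        simp
      · by_cases hf : pvFits n? c = true
        · rw [show pvR n? (l :: ls) (.inSt cur c) =
              pvR n? ls (.inSt (cur ++ '\n' :: l) (c + 1)) from by simp [pvR, hl, hf]]
          have hcap' : ∀ n, n? = some n → c + 1 ≤ n := by
            intro n hn
            rw [hn] at hf
            simp only [pvFits, decide_eq_true_eq] at hf
            omega
          rw [ih1 _ (c + 1) (by omega) hcap' (pvLastNB_tail _ _ hnb)]
          rw [show pvCountStanza (l :: ls) = pvCountStanza ls + 1 from by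
            simp [pvCountStanza, hl]]
          simp only [List.take_succ_cons, List.drop_succ_cons]
          rw [pvCont_fits n? cur c l _ hf]
        · cases hn? : n? with
          | none => rw [hn?] at hf; simp [pvFits] at hf
          | some n =>
            subst hn?
            have hlt : ¬ c < n := by
              intro hcn
              exact hf (by simp [pvFits, hcn])
            rw [show pvR (some n) (l :: ls) (.inSt cur c) =
                cur :: pvR (some n) ls (.inSt l 1) from by simp [pvR, hl, hf]]
            rw [ih1 l 1 (le_refl 1) hcap1 (pvLastNB_tail _ _ hnb)]
            rw [show pvCountStanza (l :: ls) = pvCountStanza ls + 1 from by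
              simp [pvCountStanza, hl]]
            simp only [List.take_succ_cons, List.drop_succ_cons]
            rw [pvCont_over n (hcap1 n rfl) cur c l _ hlt (hcap n rfl)]
            simp
    · -- just after one blank line
      intro last _ hnb
      by_cases hl : l = []
      · subst hl
        have hlsne : ls ≠ [] := by
          intro h0
          subst h0
          exact (hnb [] rfl) rfl
        rw [show pvR n? ([] :: ls) (.b1 last) = pvR n? ls (.b2 last) from by simp [pvR]]
        rw [ih3 last hlsne (pvLastNB_tail _ _ hnb)]
        rw [show pvCountBlank ([] :: ls) = pvCountBlank ls + 1 from by simp [pvCountBlank]]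
        rw [if_pos (by omega), List.drop_succ_cons]
        simp
      · rw [show pvR n? (l :: ls) (.b1 last) = last :: pvR n? ls (.inSt l 1) from by
          simp [pvR, hl]]
        rw [ih1 l 1 (le_refl 1) hcap1 (pvLastNB_tail _ _ hnb)]
        rw [show pvCountBlank (l :: ls) = 0 from by simp [pvCountBlank, hl]]
        rw [if_neg (by omega : ¬ 1 ≤ 0), List.drop_zero, List.nil_append]
        rw [pvEmit_stanza n? l ls hl, pvCH n? hp]
    · -- after two or more blank lines
      intro last _ hnb
      by_cases hl : l = []
      · subst hl
        have hlsne : ls ≠ [] := by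
          intro h0
          subst h0
          exact (hnb [] rfl) rfl
        rw [show pvR n? ([] :: ls) (.b2 last) = pvR n? ls (.b2 last) from by simp [pvR]]
        rw [ih3 last hlsne (pvLastNB_tail _ _ hnb)]
        rw [show pvCountBlank ([] :: ls) = pvCountBlank ls + 1 from by simp [pvCountBlank]]
        rw [List.drop_succ_cons]
      · rw [show pvR n? (l :: ls) (.b2 last) = last :: [] :: pvR n? ls (.inSt l 1) from by
          simp [pvR, hl]]
        rw [ih1 l 1 (le_refl 1) hcap1 (pvLastNB_tail _ _ hnb)]
        rw [show pvCountBlank (l :: ls) = 0 from by simp [pvCountBlank, hl]]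
        rw [List.drop_zero]
        rw [pvEmit_stanza n? l ls hl, pvCH n? hp]

-- head of pvR extends the current slide
theorem pvR_b2_head (n? : Option Int) (ls : List (List Char)) (last : List Char) :
    (pvR n? ls (.b2 last)).head? = some last := by
  induction ls with
  | nil => simp [pvR]
  | cons l t ih => by_cases h : l = [] <;> simp [pvR, h, ih]

theorem pvR_b1_head (n? : Option Int) (ls : List (List Char)) (last : List Char) :
    (pvR n? ls (.b1 last)).head? = some last := by
  cases ls with
  | nil => simp [pvR]
  | cons l t => by_cases h : l = [] <;> simp [pvR, h, pvR_b2_head]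

theorem pvR_inSt_head (n? : Option Int) (ls : List (List Char)) (cur : List Char) (c : Int) :
    ∃ t, (pvR n? ls (.inSt cur c)).head? = some (cur ++ t) := by
  induction ls generalizing cur c with
  | nil => exact ⟨[], by simp [pvR]⟩
  | cons l r ih =>
    by_cases h : l = []
    · exact ⟨[], by simp [pvR, h, pvR_b1_head]⟩
    · by_cases hf : pvFits n? c = true
      · obtain ⟨t, ht⟩ := ih (cur ++ '\n' :: l) (c + 1)
        exact ⟨'\n' :: l ++ t, by simp [pvR, h, hf, ht]⟩
      · exact ⟨[], by simp [pvR, h, hf]⟩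

-- ===== VERDICT (by name: the statement is the Claim_ definition above) =====
theorem parse_song_lyrics_spec : Claim_equal_parse_song_lyrics := by
  unfold Claim_equal_parse_song_lyrics
  intro lyrics n? _ hpre
  unfold Pre_parse_song_lyrics at hpre
  unfold Spec_parse_song_lyrics
  unfold parse_song_lyrics parse_song_lyrics_alt
  rw [pvSplitOn_eq]
  by_cases hL : PySem.Chars.strip lyrics.toList = []
  · rw [hL, if_pos rfl]
    have h1 : pvSplitNL [] ([] : List Char) = [[]] := by simp [pvSplitNL]
    rw [h1, List.foldl_cons, List.foldl_nil]
    have h2 : pvStepA n? ([[]], 0) [] = ([[], []], 0) := by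
      have : PySem.Chars.strip ([] : List Char) = [] := by rfl
      simp [pvStepA, this]
    rw [h2]
    simp
  · rw [if_neg hL]
    obtain ⟨hch, tch, hLc⟩ := List.exists_cons_of_ne_nil hL
    -- the first character of the stripped text is not whitespace, hence not a newline
    have hh : PySem.Chars.isspace hch = false := by
      have := pvStrip_head lyrics.toList hL
      rw [show (PySem.Chars.strip lyrics.toList).head hL = hch from by
        simp [hLc]] at this
      exact this
    have hnl : PySem.Chars.isspace '\n' = true := by decide
    have hhne : hch ≠ '\n' := by
      intro he
      rw [he, hnl] at hh
      simp at hh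
    -- nor is the last one
    have hlw : PySem.Chars.isspace ((PySem.Chars.strip lyrics.toList).getLast hL) = false :=
      pvStrip_getLast lyrics.toList hL
    have hlne : (PySem.Chars.strip lyrics.toList).getLast hL ≠ '\n' := by
      intro he
      rw [he, hnl] at hlw
      simp at hlw
    -- destructure the split
    obtain ⟨g, hg, hgm⟩ := pvSplitNL_getLast [] (PySem.Chars.strip lyrics.toList) hL hlne
    cases hpz : pvSplitNL [] (PySem.Chars.strip lyrics.toList) with
    | nil => exact absurd hpz (pvSplitNL_ne_nil _ _)
    | cons p0 prest =>
      have hhead := pvSplitNL_head [] (PySem.Chars.strip lyrics.toList)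
      rw [hpz] at hhead
      simp only [List.head?_cons, List.nil_append, Option.some.injEq] at hhead
      have hp0 : p0 = hch :: List.takeWhile (fun c => decide (c ≠ '\n')) tch := by
        simp only [hhead, hLc, List.takeWhile_cons]
        rw [if_pos (by simpa using hhne)]
      have hl1 : PySem.Chars.strip p0 ≠ [] := by
        apply pvStrip_ne_nil p0 hch _ hh
        rw [hp0]
        exact List.mem_cons_self
      -- last line of the stripped pieces is non-blank
      have hnb : pvLastNB ((p0 :: prest).map PySem.Chars.strip) := by
        intro x hx
        rw [List.getLast?_map] at hx
        rw [hpz] at hg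
        rw [hg] at hx
        simp only [Option.map_some, Option.some.injEq] at hx
        rw [← hx]
        exact pvStrip_ne_nil g _ hgm hlw
      -- fold over stripped pieces
      have hconv : (p0 :: prest).foldl (pvStepA n?) ([[]], 0) =
          ((p0 :: prest).map PySem.Chars.strip).foldl (pvCore n?) ([[]], 0) := by
        rw [List.foldl_map]
        rfl
      rw [hconv]
      simp only [List.map_cons, List.foldl_cons]
      have hstep1 : pvCore n? ([[]], 0) (PySem.Chars.strip p0) = ([PySem.Chars.strip p0], 1) := by
        simp only [pvCore]
        rw [if_neg hl1, if_pos (pvFits_zero n? hpre), if_neg (by omega : ¬ (0:Int) ≠ 0)]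
        simp [pvAppendLast]
      rw [hstep1]
      have hAR := pvAR n? hpre (prest.map PySem.Chars.strip) [] (.inSt (PySem.Chars.strip p0) 1)
        ⟨hl1, le_refl 1⟩
      simp only [pvRepr, pvCOf, List.nil_append] at hAR
      have hnb' : pvLastNB (prest.map PySem.Chars.strip) := by
        have := pvLastNB_tail (PySem.Chars.strip p0) (prest.map PySem.Chars.strip)
        apply this
        simpa using hnb
      have hRB := (pvRB n? hpre (prest.map PySem.Chars.strip)).1 (PySem.Chars.strip p0) 1
        (le_refl 1) (fun n hn => by rw [hn] at hpre; simpa using hpre) hnb'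
      obtain ⟨tx, htx⟩ := pvR_inSt_head n? (prest.map PySem.Chars.strip) (PySem.Chars.strip p0) 1
      have hne2 : pvR n? (prest.map PySem.Chars.strip) (.inSt (PySem.Chars.strip p0) 1) ≠
          [[], []] := by
        intro he
        rw [he] at htx
        simp only [List.head?_cons, Option.some.injEq] at htx
        exact hl1 (List.append_eq_nil_iff.mp htx.symm).1
      -- B side
      rw [pvSplitOn_eq, hpz]
      simp only [List.map_cons]
      rw [pvEmit_stanza n? _ _ hl1, pvCH n? hpre, ← hRB]
      simp only [hAR, if_neg hne2]
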